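-- pv_equiv track=rewrite | github.com/memduhcelik/TUPDIL | 2023400147.py | count_
-- ===== SOURCE A (Python) =====
-- def count_(line):#riskli
--     new_list = []
--     for i in range(len(line)):
--         if line[i] == "!":
--             new_list.append(i)
--     if len(new_list) == 2 :
--         str_ = line[:new_list[0]+1]+line[new_list[1]+1:]
--     else :
--         str_ = line
--     return str_.count(" ")
-- ===== SOURCE B (Python) =====
-- def count_(line):
--     total = between = bangs = 0
--     for ch in line:
--         if ch == "!":
--             bangs += 1
--         elif ch == " ":
--             total += 1
--             if bangs == 1:
--                 between += 1
--     return total - between if bangs == 2 else total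
-- ===== Notes on version B (the rewrite author's own statement) =====
-- stated objective: alternative
-- what changed: Replaces A's index-collecting loop plus slicing/concatenation and a substring-count pass with a single character pass keeping three counters (total spaces, spaces between the first two '!', number of '!'), returning arithmetic on them.
import Mathlib
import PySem

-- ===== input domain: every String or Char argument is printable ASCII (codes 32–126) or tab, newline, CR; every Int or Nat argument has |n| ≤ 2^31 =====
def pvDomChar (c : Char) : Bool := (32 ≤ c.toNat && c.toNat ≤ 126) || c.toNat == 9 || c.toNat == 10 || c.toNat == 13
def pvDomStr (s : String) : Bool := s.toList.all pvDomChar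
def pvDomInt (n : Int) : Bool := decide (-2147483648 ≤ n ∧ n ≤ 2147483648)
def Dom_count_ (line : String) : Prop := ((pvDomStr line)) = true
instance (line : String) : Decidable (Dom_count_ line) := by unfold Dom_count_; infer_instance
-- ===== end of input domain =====

-- B replaces A's index-collecting loop + slices + substring-count passes by one single
-- character pass with three counters (objective: alternative single-pass algorithm).

-- ===== PORT A =====
-- A's first loop: collect the indices of '!' in new_list
def aNewList (cs : List Char) : List Int :=
  (PySem.List.pyRange 0 (cs.length : Int) 1).foldl
    (fun acc i => if PySem.List.pyGet? cs i == some '!' then acc ++ [i] else acc) []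

def count_ (line : String) : Int :=
  let cs := line.toList
  let new_list := aNewList cs
  let str_ : List Char :=
    if new_list.length = 2 then
      PySem.List.slice cs none (some (PySem.List.pyGetD new_list 0 0 + 1)) ++
      PySem.List.slice cs (some (PySem.List.pyGetD new_list 1 0 + 1)) none
    else cs
  (PySem.Chars.count str_ [' '] : Int)

-- ===== PORT B =====
-- one step of B's loop over the state (total, between, bangs)
def bStep (st : Int × Int × Int) (ch : Char) : Int × Int × Int :=
  if ch == '!' then (st.1, st.2.1, st.2.2 + 1)
  else if ch == ' ' then
    (st.1 + 1, if st.2.2 == 1 then st.2.1 + 1 else st.2.1, st.2.2)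
  else st

def count__alt (line : String) : Int :=
  let st := line.toList.foldl bStep (0, 0, 0)
  if st.2.2 == 2 then st.1 - st.2.1 else st.1

-- ===== PRECONDITION & SPEC =====
def Spec_count_ (line : String) (out : Int) : Prop := out = count__alt line
instance (line : String) (out : Int) : Decidable (Spec_count_ line out) := by unfold Spec_count_; infer_instance

-- ===== CLAIM (what is proved, stated in full; the proofs are below) =====
def Claim_equal_count_ : Prop := ∀ (line : String), Dom_count_ line → Spec_count_ line (count_ line)

-- ===== LEMMAS AND PROOFS =====

-- positions of the character c in a list (natural-number form of A's new_list)
def posList (c : Char) : List Char → List Nat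
  | [] => []
  | x :: xs => (if x = c then [0] else []) ++ (posList c xs).map (· + 1)

theorem length_posList (c : Char) (cs : List Char) :
    (posList c cs).length = cs.count c := by
  induction cs with
  | nil => simp [posList]
  | cons x xs ih =>
    by_cases h : x = c <;> simp [posList, h, ih, List.count_cons]

theorem filter_range_eq_posList (c : Char) (cs : List Char) :
    (List.range cs.length).filter (fun i => cs[i]? == some c) = posList c cs := by
  induction cs with
  | nil => simp [posList]
  | cons x xs ih =>
    have hs : List.range (x :: xs).length = 0 :: (List.range xs.length).map Nat.succ := by
      simpa using List.range_succ_eq_map (n := xs.length)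
    rw [hs]
    by_cases h : x = c
    · simp [posList, h, List.filter_map, Function.comp_def, ← ih, Nat.succ_eq_add_one,
        List.map_map]
    · simp [posList, h, List.filter_map, Function.comp_def, ← ih, Nat.succ_eq_add_one,
        List.map_map]

theorem posList_append (c : Char) (p q : List Char) :
    posList c (p ++ q) = posList c p ++ (posList c q).map (· + p.length) := by
  induction p with
  | nil => simp [posList]
  | cons x xs ih =>
    have hmm : ∀ l : List Nat, (l.map (· + xs.length)).map (· + 1) = l.map (· + (xs.length + 1)) := by
      intro l
      rw [List.map_map]
      apply List.map_congr_left
      intro a _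
      simp [Function.comp]
      omega
    simp only [List.cons_append, posList, ih, List.map_append, hmm, List.append_assoc,
      List.length_cons]

theorem posList_of_count_zero (c : Char) (p : List Char) (h : p.count c = 0) :
    posList c p = [] := by
  have hl := length_posList c p
  rw [h] at hl
  exact List.eq_nil_of_length_eq_zero hl

-- decomposition: a list containing c splits at its first c
theorem exists_split (c : Char) (cs : List Char) (n : Nat) (h : cs.count c = n + 1) :
    ∃ p q, cs = p ++ c :: q ∧ p.count c = 0 ∧ q.count c = n := by
  induction cs with
  | nil => simp at h
  | cons x xs ih =>
    by_cases hx : x = c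
    · refine ⟨[], xs, by simp [hx], by simp, ?_⟩
      subst hx
      simpa [List.count_cons] using h
    · have h' : xs.count c = n + 1 := by simpa [List.count_cons, hx] using h
      obtain ⟨p, q, h1, h2, h3⟩ := ih h'
      exact ⟨x :: p, q, by simp [h1], by simp [List.count_cons, hx, h2], h3⟩

-- Chars.count with a single-character needle is List.count
theorem count_go_single (c : Char) (fuel : Nat) :
    ∀ (l : List Char) (acc : Nat), l.length ≤ fuel →
      PySem.Chars.count.go [c] fuel l acc = acc + l.count c := by
  induction fuel with
  | zero =>
    intro l acc h
    have hl : l = [] := List.eq_nil_of_length_eq_zero (Nat.le_zero.mp h)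
    subst hl; simp [PySem.Chars.count.go]
  | succ f ih =>
    intro l acc h
    cases l with
    | nil => simp [PySem.Chars.count.go]
    | cons x t =>
      have hx' : (x == c) = true ∨ (x == c) = false := by
        by_cases hxc : x = c
        · exact Or.inl (by simp [hxc])
        · exact Or.inr (by simp [hxc])
      by_cases hx : c = x
      · have hpre : [c].isPrefixOf (x :: t) = true := by simp [List.isPrefixOf, hx]
        rw [PySem.Chars.count.go, if_pos hpre]
        have ht : t.length ≤ f := by simpa using h
        rw [ih _ _ (by simpa using ht)]
        have hcx : (x == c) = true := by simp [hx.symm]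
        simp [List.count_cons, hcx]
        omega
      · have hpre : [c].isPrefixOf (x :: t) = false := by simp [List.isPrefixOf, hx]
        rw [PySem.Chars.count.go, if_neg (by simp [hpre])]
        rw [ih _ _ (by simpa using Nat.le_of_succ_le_succ h)]
        have hcx : (x == c) = false := by
          simp only [beq_eq_false_iff_ne, ne_eq]
          intro hc; exact hx hc.symm
        simp [List.count_cons, hcx]

theorem chars_count_single (c : Char) (s : List Char) :
    PySem.Chars.count s [c] = s.count c := by
  rw [PySem.Chars.count]
  rw [if_neg (by simp)]
  exact (count_go_single c s.length s 0 le_rfl).trans (by omega)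

-- the three branches of bStep
theorem bStep_bang (t b g : Int) : bStep (t, b, g) '!' = (t, b, g + 1) := by
  unfold bStep; rw [if_pos (by decide)]

theorem bStep_space (t b g : Int) :
    bStep (t, b, g) ' ' = (t + 1, if g == 1 then b + 1 else b, g) := by
  unfold bStep; rw [if_neg (by decide), if_pos (by decide)]

theorem bStep_other (t b g : Int) (ch : Char) (h1 : ¬ ch = '!') (h2 : ¬ ch = ' ') :
    bStep (t, b, g) ch = (t, b, g) := by
  unfold bStep; rw [if_neg (by simpa using h1), if_neg (by simpa using h2)]

-- B's fold over a segment without '!'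
theorem foldB_no_bang (p : List Char) (hp : p.count '!' = 0) (t b g : Int) :
    p.foldl bStep (t, b, g) =
      (t + p.count ' ', if g == 1 then b + p.count ' ' else b, g) := by
  induction p generalizing t b with
  | nil => simp
  | cons x xs ih =>
    have hx : ¬ x = '!' := by
      intro hc; subst hc; simp [List.count_cons] at hp
    have hxs : xs.count '!' = 0 := by
      have := hp
      simp [List.count_cons, hx] at this
      exact this
    by_cases hsp : x = ' '
    · subst hsp
      rw [List.foldl_cons, bStep_space, ih hxs]
      by_cases hg : g = 1
      · subst hg
        simp [List.count_cons]
        constructor <;> push_cast <;> ring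
      · have hgf : (g == 1) = false := by simp [hg]
        simp [hgf, List.count_cons]
        push_cast; ring
    · rw [List.foldl_cons, bStep_other _ _ _ _ hx hsp, ih hxs]
      have hsf : (x == ' ') = false := by simp [hsp]
      simp [List.count_cons, hsf]

-- B's fold: the total-spaces and bang-count components, over any list
theorem foldB_general (cs : List Char) :
    ∀ (t b g : Int),
      (cs.foldl bStep (t, b, g)).1 = t + cs.count ' ' ∧
      (cs.foldl bStep (t, b, g)).2.2 = g + cs.count '!' := by
  induction cs with
  | nil => intro t b g; simp
  | cons x xs ih =>
    intro t b g
    by_cases hx : x = '!'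
    · subst hx
      rw [List.foldl_cons, bStep_bang]
      obtain ⟨h1, h2⟩ := ih t b (g + 1)
      refine ⟨?_, ?_⟩
      · rw [h1]
        have : ('!' == ' ') = false := by decide
        simp [List.count_cons, this]
      · rw [h2]
        simp [List.count_cons]
        push_cast; ring
    · by_cases hsp : x = ' '
      · subst hsp
        rw [List.foldl_cons, bStep_space]
        obtain ⟨h1, h2⟩ := ih (t + 1) (if g == 1 then b + 1 else b) g
        refine ⟨?_, ?_⟩
        · rw [h1]
          simp [List.count_cons]
          push_cast; ring
        · rw [h2]
          have : (' ' == '!') = false := by decide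
          simp [List.count_cons, this]
      · rw [List.foldl_cons, bStep_other _ _ _ _ hx hsp]
        obtain ⟨h1, h2⟩ := ih t b g
        have hs1 : (x == ' ') = false := by simp [hsp]
        have hs2 : (x == '!') = false := by simp [hx]
        exact ⟨by rw [h1]; simp [List.count_cons, hs1],
               by rw [h2]; simp [List.count_cons, hs2]⟩

-- A's new_list equals the position list, cast to Int
theorem new_list_eq (cs : List Char) :
    aNewList cs = (posList '!' cs).map (fun n : Nat => (n : Int)) := by
  unfold aNewList
  have hr : PySem.List.pyRange 0 (cs.length : Int) 1
      = (List.range cs.length).map (fun k : Nat => (k : Int)) := by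
    rw [PySem.List.pyRange_of_pos _ _ (by norm_num)]
    rcases Nat.eq_zero_or_pos cs.length with h0 | hpos
    · simp [h0]
    · rw [if_pos (by exact_mod_cast hpos)]
      have h1 : (((cs.length : Int) - 0 + 1 - 1) / 1).toNat = cs.length := by
        simp
      rw [h1]
      apply List.map_congr_left
      intro a _
      ring
  have hbase : List.foldl
      (fun acc i => if PySem.List.pyGet? cs i == some '!' then acc ++ [i] else acc) []
      ((List.range cs.length).map (fun k : Nat => (k : Int))) =
      [] ++ (((List.range cs.length).map (fun k : Nat => (k : Int))).filter
        (fun i => PySem.List.pyGet? cs i == some '!')) := by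
    simpa using PySem.List.foldl_append_if
      (fun i => PySem.List.pyGet? cs i == some '!') id
      ((List.range cs.length).map (fun k : Nat => (k : Int))) []
  rw [hr, hbase]
  rw [List.filter_map, List.nil_append]
  rw [← filter_range_eq_posList '!' cs]
  have hfun : ((fun i => PySem.List.pyGet? cs i == some '!') ∘ (fun k : Nat => (k : Int)))
      = (fun i => cs[i]? == some '!') := by
    funext i
    simp [Function.comp, PySem.List.pyGet?_natCast]
  rw [hfun]

theorem count__spec_aux (line : String) : count_ line = count__alt line := by
  simp only [count_, count__alt]
  rw [new_list_eq]
  set cs := line.toList with hcs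
  by_cases h2 : cs.count '!' = 2
  · -- exactly two '!': decompose cs = p ++ '!' :: q ++ '!' :: r
    obtain ⟨p, q', hp1, hp2, hq'⟩ := exists_split '!' cs 1 (by omega)
    obtain ⟨q, r, hq1, hq2, hr⟩ := exists_split '!' q' 0 (by omega)
    have hdecomp : cs = p ++ ('!' :: (q ++ ('!' :: r))) := by rw [hp1, hq1]
    have hpos : posList '!' cs = [p.length, p.length + 1 + q.length] := by
      rw [hdecomp, posList_append, posList_of_count_zero _ _ hp2]
      have hstep : posList '!' ('!' :: (q ++ ('!' :: r)))
          = 0 :: (posList '!' (q ++ ('!' :: r))).map (· + 1) := by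
        simp [posList]
      have hstep2 : posList '!' ('!' :: r) = [0] := by
        simp [posList, posList_of_count_zero _ _ hr]
      rw [hstep, posList_append, posList_of_count_zero _ _ hq2, hstep2]
      simp
      try omega
    rw [hpos]
    simp only [List.map_cons, List.map_nil]
    rw [if_pos (by simp)]
    have hget0 : PySem.List.pyGetD [((p.length : Nat) : Int), ((p.length + 1 + q.length : Nat) : Int)] 0 0
        = ((p.length : Nat) : Int) := by
      simpa using PySem.List.pyGetD_natCast
        [((p.length : Nat) : Int), ((p.length + 1 + q.length : Nat) : Int)] 0 0
    have hget1 : PySem.List.pyGetD [((p.length : Nat) : Int), ((p.length + 1 + q.length : Nat) : Int)] 1 0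
        = ((p.length + 1 + q.length : Nat) : Int) := by
      simpa using PySem.List.pyGetD_natCast
        [((p.length : Nat) : Int), ((p.length + 1 + q.length : Nat) : Int)] 1 0
    rw [hget0, hget1]
    have hc1 : (((p.length : Nat) : Int) + 1) = ((p.length + 1 : Nat) : Int) := by push_cast; ring
    have hc2 : (((p.length + 1 + q.length : Nat) : Int) + 1)
        = ((p.length + 1 + q.length + 1 : Nat) : Int) := by push_cast; ring
    rw [hc1, hc2, PySem.List.slice_to_natCast, PySem.List.slice_from_natCast]
    have htake : cs.take (p.length + 1) = p ++ ['!'] := by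
      rw [hdecomp]
      rw [show p.length + 1 = (p ++ ['!']).length by simp]
      rw [show p ++ ('!' :: (q ++ ('!' :: r))) = (p ++ ['!']) ++ (q ++ ('!' :: r)) by simp]
      exact List.take_left
    have hdrop : cs.drop (p.length + 1 + q.length + 1) = r := by
      rw [hdecomp]
      rw [show p.length + 1 + q.length + 1 = (p ++ ('!' :: (q ++ ['!']))).length by simp; try omega]
      rw [show p ++ ('!' :: (q ++ ('!' :: r))) = (p ++ ('!' :: (q ++ ['!']))) ++ r by simp]
      exact List.drop_left
    rw [htake, hdrop]
    rw [chars_count_single]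
    -- run B's fold over the decomposition
    rw [hdecomp]
    rw [List.foldl_append, List.foldl_cons, List.foldl_append, List.foldl_cons]
    rw [foldB_no_bang p hp2, bStep_bang, foldB_no_bang q hq2, bStep_bang, foldB_no_bang r hr]
    have hif0 : (((0 : Int)) == 1) = false := by decide
    have hif1 : (((0 : Int) + 1) == 1) = true := by decide
    have hif2 : (((0 : Int) + 1 + 1) == 1) = false := by decide
    have hife : (((0 : Int) + 1 + 1) == 2) = true := by decide
    rw [hif0, hif1, hif2, hife]
    simp only [if_true, if_false, Bool.false_eq_true, if_neg, if_pos]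
    have hb : ('!' == ' ') = false := by decide
    simp [List.count_append, List.count_cons, hb]
    push_cast
    ring
  · -- not exactly two '!': A keeps the line, B's bang counter is ≠ 2
    rw [if_neg (by rw [List.length_map, length_posList]; exact h2)]
    obtain ⟨h1, hbang⟩ := foldB_general cs 0 0 0
    rw [if_neg (by simp only [hbang, beq_iff_eq]; omega)]
    rw [h1, chars_count_single]
    omega

-- ===== VERDICT (by name: the statement is the Claim_ definition above) =====
theorem count__spec : Claim_equal_count_ := by
  intro line _
  unfold Spec_count_
  exact count__spec_aux line
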